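-- pv_equiv track=rewrite | github.com/Zachanardo/Intellicrack | src/intellicrack/providers/openrouter.py | _estimate_vision_support
-- ===== SOURCE A (Python) =====
-- def _estimate_vision_support(model_id: str) -> bool:
--     """Estimate if model supports vision.
--
--     Args:
--         model_id: The model identifier.
--
--     Returns:
--         True if model likely supports vision.
--     """
--     model_lower = model_id.lower()
--     vision_patterns = [
--         "vision", "gpt-4o", "gpt-4-turbo",
--         "claude-3", "gemini",
--         "llava",
--     ]
--     return any(pattern in model_lower for pattern in vision_patterns)
-- ===== SOURCE B (Python) =====
-- _VISION_PATTERNS = ("vision", "gpt-4o", "gpt-4-turbo", "claude-3", "gemini", "llava")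
--
--
-- def _estimate_vision_support(model_id: str) -> bool:
--     """Single left-to-right scan: at each position of the lowercased id,
--     check whether one of the vision patterns starts there."""
--     s = model_id.lower()
--     for i in range(len(s)):
--         if any(s.startswith(p, i) for p in _VISION_PATTERNS):
--             return True
--     return False
-- ===== Notes on version B (the rewrite author's own statement) =====
-- stated objective: alternative
-- what changed: Replaces any() with a separate full substring scan per pattern by one left-to-right scan over the lowercased id that checks at each position whether any pattern starts there (startswith with an offset), so the string is traversed once.
import Mathlib
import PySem

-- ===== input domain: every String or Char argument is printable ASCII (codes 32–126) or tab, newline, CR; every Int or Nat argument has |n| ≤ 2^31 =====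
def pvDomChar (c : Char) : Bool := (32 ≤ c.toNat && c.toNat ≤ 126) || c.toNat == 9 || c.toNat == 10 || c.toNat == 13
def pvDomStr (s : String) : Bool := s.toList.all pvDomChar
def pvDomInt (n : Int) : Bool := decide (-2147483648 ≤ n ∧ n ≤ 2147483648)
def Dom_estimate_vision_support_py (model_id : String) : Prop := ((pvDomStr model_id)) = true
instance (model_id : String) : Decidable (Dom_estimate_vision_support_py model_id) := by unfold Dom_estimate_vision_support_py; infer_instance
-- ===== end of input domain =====

-- B replaces the per-pattern substring scans by one left-to-right scan checking each pattern at each position (alternative decomposition, same cost class).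


-- ===== PORT A =====
def estimate_vision_support_py (model_id : String) : Bool :=
  let model_lower := PySem.Str.lower model_id
  let vision_patterns : List String :=
    ["vision", "gpt-4o", "gpt-4-turbo", "claude-3", "gemini", "llava"]
  vision_patterns.any (fun pattern => PySem.Str.isIn pattern model_lower)

-- ===== PORT B =====
-- B-side: the fixed tuple of patterns, as lists of chars
def pvPatterns : List (List Char) :=
  ["vision".toList, "gpt-4o".toList, "gpt-4-turbo".toList,
   "claude-3".toList, "gemini".toList, "llava".toList]

-- B-side: the 'for i in range(len(s))' scan; position i is the suffix, s.startswith(p, i) is startswith on it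
def pvScan : List Char → Bool
  | [] => false
  | c :: rest =>
    (pvPatterns.any (fun p => PySem.Chars.startswith (c :: rest) p)) || pvScan rest

def estimate_vision_support_py_alt (model_id : String) : Bool :=
  pvScan (PySem.Chars.lower model_id.toList)

-- ===== PRECONDITION & SPEC =====
def Spec_estimate_vision_support_py (model_id : String) (out : Bool) : Prop := out = estimate_vision_support_py_alt model_id
instance (model_id : String) (out : Bool) : Decidable (Spec_estimate_vision_support_py model_id out) := by unfold Spec_estimate_vision_support_py; infer_instance

-- ===== CLAIM (what is proved, stated in full; the proofs are below) =====
def Claim_equal_estimate_vision_support_py : Prop := ∀ (model_id : String), Dom_estimate_vision_support_py model_id → Spec_estimate_vision_support_py model_id (estimate_vision_support_py model_id)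

-- ===== LEMMAS AND PROOFS =====
lemma pv_isIn_cons (p : List Char) (c : Char) (rest : List Char) :
    PySem.Chars.isIn p (c :: rest)
      = (PySem.Chars.startswith (c :: rest) p || PySem.Chars.isIn p rest) := by
  rw [Bool.eq_iff_iff]
  simp [PySem.Chars.isIn_iff_infix, PySem.Chars.startswith_iff, List.infix_cons_iff]

lemma pv_any_isIn_cons (pats : List (List Char)) (c : Char) (rest : List Char) :
    pats.any (fun p => PySem.Chars.isIn p (c :: rest))
      = ((pats.any (fun p => PySem.Chars.startswith (c :: rest) p))
          || pats.any (fun p => PySem.Chars.isIn p rest)) := by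
  induction pats with
  | nil => rfl
  | cons q qs ih =>
    rw [List.any_cons, List.any_cons, List.any_cons, ih]
    simp only [pv_isIn_cons]
    cases PySem.Chars.startswith (c :: rest) q <;>
      cases PySem.Chars.isIn q rest <;> simp

lemma pvScan_eq (s : List Char) :
    pvScan s = pvPatterns.any (fun p => PySem.Chars.isIn p s) := by
  induction s with
  | nil => decide
  | cons c rest ih => rw [pvScan, ih, pv_any_isIn_cons]

-- ===== VERDICT (by name: the statement is the Claim_ definition above) =====
theorem estimate_vision_support_py_spec : Claim_equal_estimate_vision_support_py := by
  intro model_id _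
  unfold Spec_estimate_vision_support_py estimate_vision_support_py estimate_vision_support_py_alt
  rw [pvScan_eq]
  simp [pvPatterns, PySem.Str.isIn, PySem.Str.lower]
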